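-- pv_equiv track=rewrite | github.com/gaaona/Pystudy | 백준/Silver/2512. 예산/예산.py | f
-- ===== SOURCE A (Python) =====
-- def f(nums, budget):
--     left, right = 0, max(nums)
--     answer = 0
--     while left <= right:
--         mid = (left + right) // 2
--         total = 0
--         for num in nums:
--             total += min(num, mid)
--         if total <= budget:
--             answer = mid
--             left = mid + 1
--         else:
--             right = mid - 1
--     return answer
-- ===== SOURCE B (Python) =====
-- def f(nums, budget):
--     M = max(nums)
--     if M <= 0:
--         return 0
--     s = sorted(nums)
--     if sum(s) <= budget:
--         return M
--     prefix = 0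
--     count = len(s)
--     for v in s:
--         cand = (budget - prefix) // count
--         if cand < v:
--             return max(cand, 0)
--         prefix += v
--         count -= 1
--     return M
-- ===== Notes on version B (the rewrite author's own statement) =====
-- stated objective: faster
-- what changed: Replaced the binary search over the cap (each probe recomputing sum(min(num,mid)) over the whole list, ~log(max) full passes) with one pass over a sorted copy maintaining a prefix sum and deriving the cap directly by floor division.
import Mathlib
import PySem

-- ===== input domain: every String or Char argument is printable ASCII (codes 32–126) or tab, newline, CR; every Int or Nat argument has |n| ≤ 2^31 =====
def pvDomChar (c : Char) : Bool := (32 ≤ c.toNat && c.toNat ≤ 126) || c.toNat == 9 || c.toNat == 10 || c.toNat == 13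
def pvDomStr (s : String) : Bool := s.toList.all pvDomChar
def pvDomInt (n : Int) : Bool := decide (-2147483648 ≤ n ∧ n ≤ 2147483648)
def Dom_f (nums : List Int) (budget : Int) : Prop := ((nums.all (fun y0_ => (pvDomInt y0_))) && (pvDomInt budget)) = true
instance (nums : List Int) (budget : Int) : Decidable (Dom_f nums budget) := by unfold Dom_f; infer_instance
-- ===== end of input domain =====

-- B replaces A's binary search over the cap (~log(max) full passes) by a single pass over a sorted
-- copy with a running prefix sum and a floor-division candidate; objective: faster (measured).

-- ===== PORT A =====
-- while left <= right: mid = (left+right)//2; total = sum of min(num, mid); accept or shrink.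
def fLoop (nums : List Int) (budget : Int) (left right answer : Int) : Int :=
  if h : left ≤ right then
    let mid := PySem.Int.floordiv (left + right) 2
    let total := nums.foldl (fun t v => t + min v mid) 0
    if total ≤ budget then fLoop nums budget (mid + 1) right mid
    else fLoop nums budget left (mid - 1) answer
  else answer
termination_by (right + 1 - left).toNat
decreasing_by
  · have := PySem.Int.floordiv_two_mid_bounds h; omega
  · have := PySem.Int.floordiv_two_mid_bounds h; omega

def f (nums : List Int) (budget : Int) : Int :=
  match PySem.List.max? nums (fun y => y) with
  | none => 0          -- max([]) raises ValueError in Python; excluded by Pre_f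
  | some right => fLoop nums budget 0 right 0

-- ===== PORT B =====
-- for v in s: cand = (budget - prefix) // count; if cand < v: return max(cand, 0); else consume v.
def scanB (budget M : Int) : List Int → Int → Int → Int
  | [], _, _ => M
  | v :: rest, pref, count =>
    let cand := PySem.Int.floordiv (budget - pref) count
    if cand < v then max cand 0
    else scanB budget M rest (pref + v) (count - 1)

def f_alt (nums : List Int) (budget : Int) : Int :=
  match PySem.List.max? nums (fun y => y) with
  | none => 0          -- max([]) raises ValueError in Python; excluded by Pre_f
  | some M =>
    if M ≤ 0 then 0
    else
      let s := PySem.List.sorted nums (fun y => y) false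
      if s.sum ≤ budget then M
      else scanB budget M s 0 (s.length : Int)

-- ===== PRECONDITION & SPEC =====
-- Pre_f excludes only the empty list, on which A (and B alike) raise ValueError from max([]).
def Pre_f (nums : List Int) (budget : Int) : Prop := nums ≠ []
instance (nums : List Int) (budget : Int) : Decidable (Pre_f nums budget) := by unfold Pre_f; infer_instance
def pvWitness_f : List Int × Int := ([1, 2, 3], 4)

def Spec_f (nums : List Int) (budget : Int) (out : Int) : Prop := out = f_alt nums budget
instance (nums : List Int) (budget : Int) (out : Int) : Decidable (Spec_f nums budget out) := by unfold Spec_f; infer_instance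

-- ===== CLAIM (what is proved, stated in full; the proofs are below) =====
def Claim_equal_f : Prop := ∀ (nums : List Int) (budget : Int), Dom_f nums budget → Pre_f nums budget → Spec_f nums budget (f nums budget)

-- ===== LEMMAS AND PROOFS =====

-- sum(min(num, m) for num in nums)
def gsum (nums : List Int) (m : Int) : Int := (nums.map (fun v => min v m)).sum

-- the common characterization: res is the largest cap in [0, M] whose levy fits the budget, else 0
def Good (nums : List Int) (budget M res : Int) : Prop :=
  (res = 0 ∧ ∀ m : Int, 0 ≤ m → m ≤ M → ¬ gsum nums m ≤ budget) ∨
  (0 ≤ res ∧ res ≤ M ∧ gsum nums res ≤ budget ∧ ∀ m : Int, res < m → m ≤ M → ¬ gsum nums m ≤ budget)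

lemma gsum_mono (nums : List Int) {m m' : Int} (h : m ≤ m') : gsum nums m ≤ gsum nums m' := by
  unfold gsum
  exact List.sum_le_sum (fun v _ => min_le_min le_rfl h)

lemma gsum_perm {s nums : List Int} (h : s.Perm nums) (m : Int) : gsum s m = gsum nums m :=
  (h.map (fun v => min v m)).sum_eq

lemma gsum_split (c t : List Int) (m : Int)
    (h₁ : ∀ x ∈ c, x ≤ m) (h₂ : ∀ y ∈ t, m ≤ y) :
    gsum (c ++ t) m = c.sum + m * t.length := by
  unfold gsum
  rw [List.map_append, List.sum_append]
  have hc : (c.map (fun v => min v m)).sum = c.sum := by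
    congr 1
    apply List.map_congr_left ?_ |>.trans (List.map_id c)
    intro x hx; exact min_eq_left (h₁ x hx)
  have ht : (t.map (fun v => min v m)).sum = m * t.length := by
    induction t with
    | nil => simp
    | cons y ys ih =>
      simp only [List.map_cons, List.sum_cons, List.length_cons]
      rw [min_eq_right (h₂ y (by simp)), ih (fun z hz => h₂ z (by simp [hz]))]
      push_cast; ring
  rw [hc, ht]

lemma Good_unique (nums : List Int) (budget M r₁ r₂ : Int)
    (h₁ : Good nums budget M r₁) (h₂ : Good nums budget M r₂) : r₁ = r₂ := by
  rcases h₁ with ⟨e₁, n₁⟩ | ⟨a₁, b₁, p₁, n₁⟩ <;> rcases h₂ with ⟨e₂, n₂⟩ | ⟨a₂, b₂, p₂, n₂⟩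
  · omega
  · exact absurd p₂ (n₁ r₂ a₂ b₂)
  · exact absurd p₁ (n₂ r₁ a₁ b₁)
  · rcases lt_trichotomy r₁ r₂ with h | h | h
    · exact absurd p₂ (n₁ r₂ h b₂)
    · exact h
    · exact absurd p₁ (n₂ r₁ h b₁)

lemma fLoop_good (nums : List Int) (budget M : Int) :
    ∀ (l r a : Int), 0 ≤ l → r ≤ M →
    (l = 0 ∧ a = 0 ∨ (0 ≤ a ∧ a = l - 1 ∧ a ≤ M ∧ gsum nums a ≤ budget)) →
    (∀ m : Int, r < m → m ≤ M → ¬ gsum nums m ≤ budget) →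
    Good nums budget M (fLoop nums budget l r a) := by
  intro l r a
  generalize hn : (r + 1 - l).toNat = n
  induction n using Nat.strong_induction_on generalizing l r a with
  | _ n ih =>
  intro hl hr hinv habove
  rw [fLoop]
  by_cases hle : l ≤ r
  · simp only [hle, dite_true]
    have hmid := PySem.Int.floordiv_two_mid_bounds hle
    set mid := PySem.Int.floordiv (l + r) 2 with hmiddef
    have htot : nums.foldl (fun t v => t + min v mid) 0 = gsum nums mid := by
      rw [PySem.List.foldl_add (g := fun v => min v mid)]; simp [gsum]
    by_cases hb : nums.foldl (fun t v => t + min v mid) 0 ≤ budget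
    · simp only [hb, if_true]
      exact ih (r + 1 - (mid + 1)).toNat (by omega) (mid + 1) r mid rfl (by omega) hr
        (Or.inr ⟨by omega, by ring, by omega, by rw [← htot]; exact hb⟩) habove
    · simp only [hb, if_false]
      refine ih (mid - 1 + 1 - l).toNat (by omega) l (mid - 1) a rfl hl (by omega) hinv ?_
      intro m hm hmM hP
      have : gsum nums mid ≤ gsum nums m := gsum_mono nums (by omega)
      rw [← htot] at this
      exact hb (le_trans this hP)
  · simp only [hle, dite_false]
    rcases hinv with ⟨hl0, ha0⟩ | ⟨ha0, hal, haM, hP⟩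
    · exact Or.inl ⟨ha0, fun m h0 hM' => habove m (by omega) hM'⟩
    · exact Or.inr ⟨ha0, haM, hP, fun m hm hmM => habove m (by omega) hmM⟩

lemma f_good (nums : List Int) (budget M : Int)
    (hmax : PySem.List.max? nums (fun y => y) = some M) :
    Good nums budget M (f nums budget) := by
  unfold f
  rw [hmax]
  exact fLoop_good nums budget M 0 M 0 le_rfl le_rfl (Or.inl ⟨rfl, rfl⟩)
    (fun m h1 h2 => by intro _; omega)

lemma scanB_good (nums : List Int) (budget M : Int)
    (hM : ∀ x ∈ nums, x ≤ M)
    (s : List Int) (hperm : s.Perm nums) (hsort : s.Pairwise (· ≤ ·))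
    (hsum : ¬ s.sum ≤ budget) :
    ∀ (t c : List Int) (w : Int), s = c ++ t →
      (∀ x ∈ c, x ≤ w) → w * (t.length : Int) ≤ budget - c.sum →
      Good nums budget M (scanB budget M t c.sum (t.length : Int)) := by
  intro t
  induction t with
  | nil =>
    intro c w hs hcw hwb
    exfalso
    simp only [List.length_nil, Nat.cast_zero, mul_zero] at hwb
    rw [hs, List.append_nil] at hsum
    omega
  | cons v rest ih =>
    intro c w hs hcw hwb
    have hlen : (0:Int) < ((v :: rest).length : Int) := by
      simp only [List.length_cons]; push_cast; omega
    simp only [scanB]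
    set count := ((v :: rest).length : Int) with hcountdef
    set cand := PySem.Int.floordiv (budget - c.sum) count with hcanddef
    have hpair := hsort
    rw [hs, List.pairwise_append] at hpair
    obtain ⟨hpc, hpt, hct⟩ := hpair
    have hvrest : ∀ y ∈ rest, v ≤ y := (List.pairwise_cons.mp hpt).1
    have hwle : w ≤ cand := by
      rw [hcanddef]
      exact (PySem.Int.le_floordiv_iff_mul_le hlen).mpr hwb
    by_cases hlt : cand < v
    · simp only [hlt, if_true]
      have hxc : ∀ x ∈ c, x ≤ cand := fun x hx => le_trans (hcw x hx) hwle
      have htge : ∀ y ∈ v :: rest, cand + 1 ≤ y := by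
        intro y hy
        rcases List.mem_cons.mp hy with rfl | hy
        · omega
        · have := hvrest y hy; omega
      have hcc : cand * count ≤ budget - c.sum := by
        rw [hcanddef]; exact (PySem.Int.le_floordiv_iff_mul_le hlen).mp le_rfl
      have hcc' : budget - c.sum < (cand + 1) * count := by
        have : cand < cand + 1 := by omega
        rw [hcanddef] at this ⊢
        exact (PySem.Int.floordiv_lt_iff_lt_mul hlen).mp this
      have hPc : gsum nums cand ≤ budget := by
        rw [← gsum_perm hperm, hs,
          gsum_split c (v :: rest) cand hxc (fun y hy => by have := htge y hy; omega)]
        rw [← hcountdef]; linarith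
      have hNc : ¬ gsum nums (cand + 1) ≤ budget := by
        rw [← gsum_perm hperm, hs,
          gsum_split c (v :: rest) (cand + 1) (fun x hx => by have := hxc x hx; omega) htge]
        rw [← hcountdef]; linarith
      have hvM : v ≤ M := hM v (hperm.mem_iff.mp (hs ▸ (by simp : v ∈ c ++ v :: rest)))
      by_cases h0 : 0 ≤ cand
      · rw [max_eq_left h0]
        exact Or.inr ⟨h0, by omega, hPc,
          fun m hm hmM hP => hNc (le_trans (gsum_mono nums (by omega)) hP)⟩
      · rw [max_eq_right (by omega : cand ≤ 0)]
        exact Or.inl ⟨rfl, fun m h0' hmM hP => hNc (le_trans (gsum_mono nums (by omega)) hP)⟩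
    · simp only [hlt, if_false]
      have hvc : v ≤ cand := not_lt.mp hlt
      have hvcount : v * count ≤ budget - c.sum := by
        refine (PySem.Int.le_floordiv_iff_mul_le hlen).mp ?_
        rw [← hcanddef]; exact hvc
      have h1 : (c ++ [v]).sum = c.sum + v := by simp
      have h2 : ((rest.length : Nat) : Int) = count - 1 := by
        rw [hcountdef, List.length_cons]; push_cast; ring
      have hre := ih (c ++ [v]) v (by rw [hs, List.append_assoc]; rfl)
        (fun x hx => by
          rcases List.mem_append.mp hx with hx | hx
          · exact hct x hx v (by simp)
          · simp at hx; omega)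
        (by
          rw [h1, h2]
          have : v * (count - 1) = v * count - v := by ring
          linarith [this])
      rw [h1, h2] at hre
      exact hre

lemma f_alt_good (nums : List Int) (budget M : Int) (hne : nums ≠ [])
    (hmax : PySem.List.max? nums (fun y => y) = some M) :
    Good nums budget M (f_alt nums budget) := by
  have hM : ∀ x ∈ nums, x ≤ M := fun x hx => PySem.List.max?_isMax hmax x hx
  unfold f_alt
  rw [hmax]
  set s := PySem.List.sorted nums (fun y => y) false with hsdef
  have hperm : s.Perm nums := PySem.List.sorted_perm nums (fun y => y) false
  have hsort : s.Pairwise (· ≤ ·) := PySem.List.sorted_pairwise nums (fun y => y)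
  have hsum_eq : s.sum = nums.sum := hperm.sum_eq
  by_cases hM0 : M ≤ 0
  · simp only [hM0, if_true]
    rcases lt_or_eq_of_le hM0 with hlt | heq
    · exact Or.inl ⟨rfl, fun m h0 hm => by intro _; omega⟩
    · by_cases hP : gsum nums 0 ≤ budget
      · exact Or.inr ⟨le_rfl, by omega, hP, fun m hm hmM => by intro _; omega⟩
      · refine Or.inl ⟨rfl, fun m h0 hmM => ?_⟩
        have : m = 0 := by omega
        rwa [this]
  · simp only [hM0, if_false]
    by_cases hsb : s.sum ≤ budget
    · simp only [hsb, if_true]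
      refine Or.inr ⟨by omega, le_rfl, ?_, fun m hm hmM => by intro _; omega⟩
      have hg : gsum nums M = nums.sum := by
        unfold gsum
        rw [List.map_congr_left (fun x hx => min_eq_left (hM x hx)) |>.trans (List.map_id nums)]
      rw [hg, ← hsum_eq]; exact hsb
    · simp only [hsb, if_false]
      have hsne : s ≠ [] := by
        intro h
        rw [h] at hperm
        exact hne (List.Perm.eq_nil hperm.symm)
      have hlen : (0:Int) < (s.length : Int) := by
        exact_mod_cast List.length_pos_iff.mpr hsne
      have h0 := scanB_good nums budget M hM s hperm hsort hsb s [] (PySem.Int.floordiv budget (s.length : Int))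
        (List.nil_append s).symm (by simp)
        (by
          have := (PySem.Int.le_floordiv_iff_mul_le hlen (a := budget)).mp le_rfl
          simpa using this)
      simpa using h0

-- ===== VERDICT (by name: the statement is the Claim_ definition above) =====
theorem f_spec : Claim_equal_f := by
  intro nums budget _ hpre
  unfold Spec_f
  cases hmax : PySem.List.max? nums (fun y => y) with
  | none => exact absurd ((PySem.List.max?_eq_none_iff nums (fun y => y)).mp hmax) hpre
  | some M =>
    exact Good_unique nums budget M _ _ (f_good nums budget M hmax)
      (f_alt_good nums budget M hpre hmax)
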